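-- pv_equiv track=rewrite | github.com/jojo8356/qlnes | qlnes/asm_text.py | find_ascii_runs
-- ===== SOURCE A (Python) =====
-- from typing import List, Optional, Tuple
--
-- PRINTABLE_MIN = 0x20
--
-- PRINTABLE_MAX = 0x7E
--
-- DEFAULT_MIN_RUN = 4
--
-- def find_ascii_runs(
--     bytes_list: List[int], min_len: int = DEFAULT_MIN_RUN
-- ) -> List[Tuple[int, int]]:
--     runs: List[Tuple[int, int]] = []
--     start: Optional[int] = None
--     for i, b in enumerate(bytes_list):
--         if PRINTABLE_MIN <= b <= PRINTABLE_MAX: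
--             if start is None:
--                 start = i
--         else:
--             if start is not None and i - start >= min_len:
--                 runs.append((start, i))
--             start = None
--     if start is not None and len(bytes_list) - start >= min_len:
--         runs.append((start, len(bytes_list)))
--     return runs
-- ===== SOURCE B (Python) =====
-- from itertools import groupby
-- from typing import List, Tuple
--
-- PRINTABLE_MIN = 0x20
-- PRINTABLE_MAX = 0x7E
-- DEFAULT_MIN_RUN = 4
--
-- def find_ascii_runs(
--     bytes_list: List[int], min_len: int = DEFAULT_MIN_RUN
-- ) -> List[Tuple[int, int]]:
--     runs: List[Tuple[int, int]] = []
--     idx = 0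
--     for is_printable, group in groupby(
--         bytes_list, key=lambda b: PRINTABLE_MIN <= b <= PRINTABLE_MAX
--     ):
--         length = sum(1 for _ in group)
--         if is_printable and length >= min_len:
--             runs.append((idx, idx + length))
--         idx += length
--     return runs
-- ===== Notes on version B (the rewrite author's own statement) =====
-- stated objective: idiomatic
-- what changed: Replaced A's explicit start/None state machine over enumerate with an itertools.groupby pass over the printability key: consume each maximal constant-key group, emit printable groups of length >= min_len, and advance an index accumulator.
import Mathlib
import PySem

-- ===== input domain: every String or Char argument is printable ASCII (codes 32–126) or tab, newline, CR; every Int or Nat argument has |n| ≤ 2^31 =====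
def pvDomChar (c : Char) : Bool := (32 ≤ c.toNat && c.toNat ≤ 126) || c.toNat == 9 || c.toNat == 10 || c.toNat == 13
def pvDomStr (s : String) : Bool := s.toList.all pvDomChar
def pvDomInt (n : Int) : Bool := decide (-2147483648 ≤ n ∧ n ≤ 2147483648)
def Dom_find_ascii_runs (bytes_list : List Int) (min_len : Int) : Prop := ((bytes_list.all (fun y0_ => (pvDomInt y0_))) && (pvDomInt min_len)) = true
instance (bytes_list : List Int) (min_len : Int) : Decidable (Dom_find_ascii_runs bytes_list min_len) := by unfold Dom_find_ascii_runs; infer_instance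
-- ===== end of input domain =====

-- B rewrites A's explicit start/None state machine as a groupby over the printability
-- key (peel maximal constant-key groups, keep printable ones of length ≥ min_len);
-- objective: idiomatic, same cost.

-- PRINTABLE_MIN <= b <= PRINTABLE_MAX
def pvPrint (b : Int) : Bool := 32 ≤ b && b ≤ 126

-- ===== PORT A =====
-- the body of A's 'for i, b in enumerate(bytes_list)' loop; state = (runs, start)
def pvStepA (min_len : Int) (st : List (Int × Int) × Option Int) (p : Int × Int) :
    List (Int × Int) × Option Int :=
  if pvPrint p.2 then
    match st.2 with
    | none => (st.1, some p.1)
    | some s => (st.1, some s)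
  else
    match st.2 with
    | some s => ((if p.1 - s ≥ min_len then st.1 ++ [(s, p.1)] else st.1), none)
    | none => (st.1, none)

def find_ascii_runs (bytes_list : List Int) (min_len : Int) : List (Int × Int) :=
  let res := (PySem.List.enumerate bytes_list 0).foldl (pvStepA min_len) ([], none)
  match res.2 with
  | some s =>
      if ((bytes_list.length : Int)) - s ≥ min_len then
        res.1 ++ [(s, (bytes_list.length : Int))]
      else res.1
  | none => res.1

-- ===== PORT B =====
-- itertools.groupby: peel one maximal constant-key group at a time, emit printable
-- groups of length ≥ min_len, advance idx by the group length
def pvAltGo (min_len : Int) : List Int → Int → List (Int × Int)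
  | [], _ => []
  | b :: t, idx =>
    let k := pvPrint b
    let grp := List.takeWhile (fun x => pvPrint x == k) (b :: t)
    let rest := List.dropWhile (fun x => pvPrint x == k) (b :: t)
    (if k && decide (((grp.length : Int)) ≥ min_len) then
        [(idx, idx + (grp.length : Int))]
      else []) ++ pvAltGo min_len rest (idx + (grp.length : Int))
termination_by l _ => l.length
decreasing_by
  simp only [List.dropWhile_cons, beq_self_eq_true, if_pos]
  exact Nat.lt_succ_of_le (List.length_dropWhile_le _ _)

def find_ascii_runs_alt (bytes_list : List Int) (min_len : Int) : List (Int × Int) :=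
  pvAltGo min_len bytes_list 0

-- ===== PRECONDITION & SPEC =====
def Spec_find_ascii_runs (bytes_list : List Int) (min_len : Int) (out : List (Int × Int)) : Prop := out = find_ascii_runs_alt bytes_list min_len
instance (bytes_list : List Int) (min_len : Int) (out : List (Int × Int)) : Decidable (Spec_find_ascii_runs bytes_list min_len out) := by unfold Spec_find_ascii_runs; infer_instance

-- ===== CLAIM (what is proved, stated in full; the proofs are below) =====
def Claim_equal_find_ascii_runs : Prop := ∀ (bytes_list : List Int) (min_len : Int), Dom_find_ascii_runs bytes_list min_len → Spec_find_ascii_runs bytes_list min_len (find_ascii_runs bytes_list min_len)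

-- ===== LEMMAS AND PROOFS =====

-- A's trailing-run flush, as a function of the loop's final state
def pvFinal (min_len : Int) (st : List (Int × Int) × Option Int) (n : Int) : List (Int × Int) :=
  match st.2 with
  | some s => if n - s ≥ min_len then st.1 ++ [(s, n)] else st.1
  | none => st.1

theorem foldA_print_some (min_len : Int) (xs : List Int)
    (h : ∀ x ∈ xs, pvPrint x = true) (runs : List (Int × Int)) (i s : Int) :
    (PySem.List.enumerate xs i).foldl (pvStepA min_len) (runs, some s) = (runs, some s) := by
  induction xs generalizing i with
  | nil => simp [PySem.List.enumerate_nil]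
  | cons x t ih =>
    rw [PySem.List.enumerate_cons, List.foldl_cons]
    have hx : pvPrint x = true := h x (by simp)
    have hstep : pvStepA min_len (runs, some s) (i, x) = (runs, some s) := by
      simp [pvStepA, hx]
    rw [hstep]
    exact ih (fun y hy => h y (by simp [hy])) (i + 1)

theorem foldA_print_none (min_len : Int) (x : Int) (t : List Int)
    (h : ∀ y ∈ x :: t, pvPrint y = true) (runs : List (Int × Int)) (i : Int) :
    (PySem.List.enumerate (x :: t) i).foldl (pvStepA min_len) (runs, none) = (runs, some i) := by
  rw [PySem.List.enumerate_cons, List.foldl_cons]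
  have hx : pvPrint x = true := h x (by simp)
  have hstep : pvStepA min_len (runs, none) (i, x) = (runs, some i) := by
    simp [pvStepA, hx]
  rw [hstep]
  exact foldA_print_some min_len t (fun y hy => h y (by simp [hy])) runs (i + 1) i

theorem pvAltGo_skip (min_len : Int) (x : Int) (xs : List Int) (i : Int)
    (hx : pvPrint x = false) :
    pvAltGo min_len (x :: xs) i = pvAltGo min_len xs (i + 1) := by
  rw [pvAltGo]
  simp only [hx, Bool.false_and, List.takeWhile_cons, beq_self_eq_true, if_pos,
    List.dropWhile_cons]
  rw [if_neg (by simp), List.nil_append]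
  cases xs with
  | nil => simp [pvAltGo]
  | cons y t =>
    by_cases hy : pvPrint y = true
    · have hqy : (pvPrint y == false) = false := by rw [hy]; rfl
      simp only [List.takeWhile_cons, List.dropWhile_cons, hqy, if_neg Bool.false_ne_true]
      norm_num
    · have hy' : pvPrint y = false := by revert hy; cases pvPrint y <;> simp
      have hqy : (pvPrint y == false) = true := by rw [hy']; rfl
      conv_rhs => rw [pvAltGo]
      simp only [hy', Bool.false_and, List.takeWhile_cons, List.dropWhile_cons,
        if_pos, beq_self_eq_true]
      rw [if_neg (by simp), List.nil_append]
      congr 1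
      simp only [List.length_cons]
      push_cast
      omega

theorem pvMain (min_len : Int) : ∀ (n : Nat) (l : List Int), l.length = n →
    ∀ (runs : List (Int × Int)) (i : Int),
    pvFinal min_len ((PySem.List.enumerate l i).foldl (pvStepA min_len) (runs, none))
      (i + (l.length : Int)) = runs ++ pvAltGo min_len l i := by
  intro n
  induction n using Nat.strong_induction_on with
  | _ n IH =>
    intro l hl runs i
    match l with
    | [] => simp [PySem.List.enumerate_nil, pvFinal, pvAltGo]
    | b :: t =>
      by_cases hb : pvPrint b = true
      · -- printable head: peel the maximal printable prefix g
        have hsplit : (b :: t).takeWhile pvPrint ++ (b :: t).dropWhile pvPrint = b :: t :=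
          List.takeWhile_append_dropWhile
        have hgall : ∀ y ∈ (b :: t).takeWhile pvPrint, pvPrint y = true :=
          fun y hy => List.mem_takeWhile_imp hy
        have hgcons : (b :: t).takeWhile pvPrint = b :: t.takeWhile pvPrint := by
          simp [hb]
        have hpred : (fun x => pvPrint x == true) = pvPrint := by
          funext z; cases pvPrint z <;> rfl
        have halt : pvAltGo min_len (b :: t) i =
            (if decide ((((b :: t).takeWhile pvPrint).length : Int) ≥ min_len) then
              [(i, i + (((b :: t).takeWhile pvPrint).length : Int))] else []) ++
            pvAltGo min_len ((b :: t).dropWhile pvPrint)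
              (i + (((b :: t).takeWhile pvPrint).length : Int)) := by
          rw [pvAltGo]
          simp only [hpred, hb, Bool.true_and]
        set g := (b :: t).takeWhile pvPrint with hg
        set r := (b :: t).dropWhile pvPrint with hr
        have hlen : (b :: t).length = g.length + r.length := by
          conv_lhs => rw [← hsplit]
          simp
        have henum : PySem.List.enumerate (b :: t) i =
            PySem.List.enumerate g i ++ PySem.List.enumerate r (i + (g.length : Int)) := by
          conv_lhs => rw [← hsplit]
          rw [PySem.List.enumerate_append]
        rw [halt, henum, List.foldl_append]
        have hfoldg : (PySem.List.enumerate g i).foldl (pvStepA min_len) (runs, none) =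
            (runs, some i) := by
          rw [hgcons]
          exact foldA_print_none min_len b (t.takeWhile pvPrint)
            (fun y hy => hgall y (hgcons ▸ hy)) runs i
        rw [hfoldg]
        cases hrc : r with
        | nil =>
          rw [hrc] at hlen
          have hlen' : ((b :: t).length : Int) = (g.length : Int) := by simp [hlen]
          simp only [PySem.List.enumerate_nil, List.foldl_nil, pvFinal, pvAltGo,
            List.append_nil, hlen']
          split_ifs with h1 h2 <;> simp_all
          omega
        | cons x r' =>
          have hd : List.dropWhile pvPrint (b :: t) = x :: r' := hr ▸ hrc
          have hx : pvPrint x = false := by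
            have hne : List.dropWhile pvPrint (b :: t) ≠ [] := by rw [hd]; simp
            have hhead := List.head_dropWhile_not pvPrint hne
            simp only [hd] at hhead
            simpa using hhead
          rw [PySem.List.enumerate_cons, List.foldl_cons]
          have hstep : pvStepA min_len (runs, some i) (i + (g.length : Int), x) =
              ((if i + (g.length : Int) - i ≥ min_len then runs ++ [(i, i + (g.length : Int))]
                else runs), none) := by
            simp [pvStepA, hx]
          rw [hstep]
          rw [hrc] at hlen
          have hlt : r'.length < n := by
            have hg1 : 1 ≤ g.length := by rw [hgcons]; simp
            simp only [List.length_cons] at hlen hl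
            omega
          have hidx : i + ((b :: t).length : Int) =
              (i + (g.length : Int) + 1) + (r'.length : Int) := by
            rw [hlen]; simp only [List.length_cons]; push_cast; ring
          rw [hidx]
          rw [IH r'.length hlt r' rfl _ _]
          rw [pvAltGo_skip min_len x r' (i + (g.length : Int)) hx]
          split_ifs with h1 h2 <;> simp_all
          omega
      · -- non-printable head: one step keeps (runs, none)
        have hb' : pvPrint b = false := by revert hb; cases pvPrint b <;> simp
        rw [PySem.List.enumerate_cons, List.foldl_cons]
        have hstep : pvStepA min_len (runs, none) (i, b) = (runs, none) := by
          simp [pvStepA, hb']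
        rw [hstep]
        have hlt : t.length < n := by simp at hl; omega
        have hidx : i + ((b :: t).length : Int) = (i + 1) + (t.length : Int) := by
          simp only [List.length_cons]; push_cast; ring
        rw [hidx, IH t.length hlt t rfl runs (i + 1),
          pvAltGo_skip min_len b t i hb']

-- ===== VERDICT (by name: the statement is the Claim_ definition above) =====
theorem find_ascii_runs_spec : Claim_equal_find_ascii_runs := by
  intro bytes_list min_len _
  unfold Spec_find_ascii_runs find_ascii_runs find_ascii_runs_alt
  have := pvMain min_len bytes_list.length bytes_list rfl [] 0
  simp only [zero_add] at this
  calc pvFinal min_len ((PySem.List.enumerate bytes_list 0).foldl (pvStepA min_len) ([], none))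
        ((bytes_list.length : Int)) = [] ++ pvAltGo min_len bytes_list 0 := this
    _ = pvAltGo min_len bytes_list 0 := by simp
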